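-- pv_equiv track=rewrite | github.com/joohyuk2074/TIL_PRACTICE_CODE | python-algorithm/programmers/level2/n^2 배열 자르기.py | solution
-- ===== SOURCE A (Python) =====
-- def solution(n, left, right):
--     answer = []
--
--     start_row = left // n
--     end_row = right // n
--
--     for i in range(start_row, end_row + 1):
--         if i == start_row:
--             start_col = left % n
--         else:
--             start_col = 0
--
--         if i == end_row:
--             end_col = right % n
--         else:
--             end_col = n - 1
--
--         for j in range(start_col, end_col + 1):
--             index = max(i, j)
--             answer.append(index + 1)
--
--     return answer
-- ===== SOURCE B (Python) =====
-- def solution(n, left, right):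
--     return [max(p // n, p % n) + 1 for p in range(left, right + 1)]
-- ===== Notes on version B (the rewrite author's own statement) =====
-- stated objective: simpler
-- what changed: Replaces A's nested row/column loops with their four start_col/end_col/start_row/end_row boundary branches by a single flat pass p = left..right computing i = p//n, j = p%n directly, since the flattened position of cell (i,j) is exactly i*n+j.
-- outside the precondition, e.g. on solution(0, 0, 0): A raises ZeroDivisionError, B raises ZeroDivisionError; on solution(-5, -8, -4): A returns [], B returns [2, 2, 2, 2, 1]
import Mathlib
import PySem

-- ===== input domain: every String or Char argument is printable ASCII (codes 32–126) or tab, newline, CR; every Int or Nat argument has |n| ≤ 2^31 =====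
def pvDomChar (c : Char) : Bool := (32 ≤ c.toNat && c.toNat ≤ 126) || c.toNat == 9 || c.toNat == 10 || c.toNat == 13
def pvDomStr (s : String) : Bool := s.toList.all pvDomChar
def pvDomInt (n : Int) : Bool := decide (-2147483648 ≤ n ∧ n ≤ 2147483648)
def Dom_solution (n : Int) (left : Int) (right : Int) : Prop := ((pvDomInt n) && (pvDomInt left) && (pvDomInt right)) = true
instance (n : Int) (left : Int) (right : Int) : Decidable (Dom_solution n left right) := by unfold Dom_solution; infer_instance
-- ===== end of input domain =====

-- B replaces A's nested row/column loops (with four boundary branches) by one flat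
-- pass p = left..right computing i = p//n, j = p%n; objective: simpler.

-- ===== PORT A =====
def solution (n : Int) (left : Int) (right : Int) : List Int :=
  let start_row := PySem.Int.floordiv left n
  let end_row := PySem.Int.floordiv right n
  (PySem.List.pyRange start_row (end_row + 1) 1).foldl (fun answer i =>
    let start_col := if i = start_row then PySem.Int.mod left n else 0
    let end_col := if i = end_row then PySem.Int.mod right n else n - 1
    (PySem.List.pyRange start_col (end_col + 1) 1).foldl (fun acc j =>
      acc ++ [max i j + 1]) answer) []

-- ===== PORT B =====
def solution_alt (n : Int) (left : Int) (right : Int) : List Int :=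
  (PySem.List.pyRange left (right + 1) 1).map (fun p =>
    max (PySem.Int.floordiv p n) (PySem.Int.mod p n) + 1)

-- ===== PRECONDITION & SPEC =====
-- Pre_ requires 0 < n: at n = 0 the Python A raises ZeroDivisionError, and n is the
-- side length of the n×n array, so negative n is outside the task's natural domain
-- (A's value there, usually [], is an accident of floor division on a negative divisor).
def Pre_solution (n : Int) (left : Int) (right : Int) : Prop := 0 < n
instance (n : Int) (left : Int) (right : Int) : Decidable (Pre_solution n left right) := by unfold Pre_solution; infer_instance

def pvWitness_solution : Int × Int × Int := (3, 2, 5)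

def Spec_solution (n : Int) (left : Int) (right : Int) (out : List Int) : Prop := out = solution_alt n left right
instance (n : Int) (left : Int) (right : Int) (out : List Int) : Decidable (Spec_solution n left right out) := by unfold Spec_solution; infer_instance

-- ===== CLAIM (what is proved, stated in full; the proofs are below) =====
def Claim_equal_solution : Prop := ∀ (n : Int) (left : Int) (right : Int), Dom_solution n left right → Pre_solution n left right → Spec_solution n left right (solution n left right)

-- ===== LEMMAS AND PROOFS =====

-- The flat-index function B applies at each position.
def pvCell (n p : Int) : Int := max (PySem.Int.floordiv p n) (PySem.Int.mod p n) + 1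

-- On row i, cell (i, j) with 0 ≤ j < n sits at flat index i*n + j.
lemma pvCell_row (n i j : Int) (hn : 0 < n) (hj0 : 0 ≤ j) (hjn : j < n) :
    pvCell n (i * n + j) = max i j + 1 := by
  have hdiv : PySem.Int.floordiv (i * n + j) n = i := by
    rw [PySem.Int.floordiv_eq_ediv_of_pos hn]
    rw [show i * n + j = j + i * n by ring, Int.add_mul_ediv_right _ _ (by omega : n ≠ 0),
      Int.ediv_eq_zero_of_lt hj0 hjn]
    ring
  have hmod : PySem.Int.mod (i * n + j) n = j := by
    rw [PySem.Int.mod_eq_emod_of_pos hn]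
    rw [show i * n + j = j + n * i by ring, Int.add_mul_emod_self_left,
      Int.emod_eq_of_lt hj0 hjn]
  simp [pvCell, hdiv, hmod]

lemma solution_alt_cell (n : Int) :
    (fun p => max (PySem.Int.floordiv p n) (PySem.Int.mod p n) + 1) = pvCell n := rfl

-- A's inner loop over columns s..e of row i produces exactly B's map over the
-- flat indices i*n+s .. i*n+e.
lemma pvInner (n i s e : Int) (acc : List Int) (hn : 0 < n) (hs : 0 ≤ s) (he : e < n) :
    (PySem.List.pyRange s (e + 1) 1).foldl (fun acc j => acc ++ [max i j + 1]) acc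
      = acc ++ (PySem.List.pyRange (i * n + s) (i * n + e + 1) 1).map (pvCell n) := by
  rw [PySem.List.foldl_append_singleton_eq_map]
  congr 1
  rw [PySem.List.pyRange_one s (e + 1), PySem.List.pyRange_one (i * n + s) (i * n + e + 1)]
  have hlen : (e + 1 - s).toNat = (i * n + e + 1 - (i * n + s)).toNat := by omega
  rw [← hlen, List.map_map, List.map_map]
  apply List.map_congr_left
  intro k hk
  have hk' : (k : Int) < e + 1 - s := by
    have := List.mem_range.mp hk
    omega
  simp only [Function.comp]
  rw [show i * n + s + (k : Int) = i * n + (s + k) by ring,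
    pvCell_row n i (s + k) hn (by omega) (by omega)]

-- The tail rows r..end_row (all past start_row) of A's outer loop produce B's map
-- over the flat indices r*n .. right.
lemma pvTail (n right sr er lm : Int) (hn : 0 < n)
    (her : er = PySem.Int.floordiv right n) :
    ∀ (m : Nat) (r : Int) (acc : List Int), (er - r).toNat = m → sr < r → r ≤ er →
    (PySem.List.pyRange r (er + 1) 1).foldl (fun answer i =>
        let start_col := if i = sr then lm else 0
        let end_col := if i = er then PySem.Int.mod right n else n - 1
        (PySem.List.pyRange start_col (end_col + 1) 1).foldl (fun acc j =>
          acc ++ [max i j + 1]) answer) acc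
      = acc ++ (PySem.List.pyRange (r * n) (right + 1) 1).map (pvCell n) := by
  have hdm : er * n + PySem.Int.mod right n = right := by
    rw [her]; exact PySem.Int.floordiv_mul_add_mod right n
  have hm0 : 0 ≤ PySem.Int.mod right n := by
    rw [PySem.Int.mod_eq_emod_of_pos hn]; exact Int.emod_nonneg _ (by omega)
  have hmn : PySem.Int.mod right n < n := by
    rw [PySem.Int.mod_eq_emod_of_pos hn]; exact Int.emod_lt_of_pos _ hn
  intro m
  induction m with
  | zero =>
    intro r acc h0 hsr hre
    have hr : r = er := by omega
    subst hr
    rw [PySem.List.pyRange_one_cons (by omega), PySem.List.pyRange_one_eq_nil (by omega)]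
    simp only [List.foldl_cons, List.foldl_nil, if_true,
      if_neg (by omega : ¬ r = sr)]
    rw [pvInner n r 0 (PySem.Int.mod right n) acc hn le_rfl hmn,
      show r * n + 0 = r * n from by ring,
      show r * n + PySem.Int.mod right n + 1 = right + 1 from by omega]
  | succ m ih =>
    intro r acc h0 hsr hre
    have hrer : r < er := by omega
    rw [PySem.List.pyRange_one_cons (by omega)]
    simp only [List.foldl_cons, if_neg (by omega : ¬ r = sr), if_neg (by omega : ¬ r = er)]
    rw [pvInner n r 0 (n - 1) acc hn le_rfl (by omega)]
    rw [ih (r + 1) _ (by omega) (by omega) (by omega)]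
    have h2 : (r + 1) * n ≤ right + 1 := by
      have := mul_le_mul_of_nonneg_right (show r + 1 ≤ er by omega) (le_of_lt hn)
      linarith
    rw [List.append_assoc, ← List.map_append,
      show r * n + 0 = r * n from by ring,
      show r * n + (n - 1) + 1 = (r + 1) * n from by ring,
      ← PySem.List.pyRange_one_append (r * n) ((r + 1) * n) (right + 1) (by nlinarith) h2]

-- ===== VERDICT (by name: the statement is the Claim_ definition above) =====
theorem solution_spec : Claim_equal_solution := by
  intro n left right _ hn
  unfold Pre_solution at hn
  unfold Spec_solution solution solution_alt
  simp only []
  set sr := PySem.Int.floordiv left n with hsr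
  set er := PySem.Int.floordiv right n with her
  have hld : sr * n + PySem.Int.mod left n = left := PySem.Int.floordiv_mul_add_mod left n
  have hrd : er * n + PySem.Int.mod right n = right := PySem.Int.floordiv_mul_add_mod right n
  have hl0 : 0 ≤ PySem.Int.mod left n := by
    rw [PySem.Int.mod_eq_emod_of_pos hn]; exact Int.emod_nonneg _ (by omega)
  have hln : PySem.Int.mod left n < n := by
    rw [PySem.Int.mod_eq_emod_of_pos hn]; exact Int.emod_lt_of_pos _ hn
  have hr0 : 0 ≤ PySem.Int.mod right n := by
    rw [PySem.Int.mod_eq_emod_of_pos hn]; exact Int.emod_nonneg _ (by omega)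
  have hrn : PySem.Int.mod right n < n := by
    rw [PySem.Int.mod_eq_emod_of_pos hn]; exact Int.emod_lt_of_pos _ hn
  rcases lt_trichotomy er sr with hlt | heq | hgt
  · -- er < sr : A's outer range is empty and right < left, so both sides are []
    have hrl : right < left := by
      have : (er + 1) * n ≤ sr * n := mul_le_mul_of_nonneg_right (by omega) (le_of_lt hn)
      nlinarith
    rw [PySem.List.pyRange_one_eq_nil (by omega : er + 1 ≤ sr),
      PySem.List.pyRange_one_eq_nil (by omega : right + 1 ≤ left)]
    simp
  · -- sr = er : a single row
    rw [PySem.List.pyRange_one_cons (by omega : sr < er + 1),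
      PySem.List.pyRange_one_eq_nil (by omega : er + 1 ≤ sr + 1)]
    simp only [List.foldl_cons, List.foldl_nil, if_true, if_pos heq.symm]
    rw [pvInner n sr (PySem.Int.mod left n) (PySem.Int.mod right n) [] hn hl0 hrn]
    rw [show sr * n + PySem.Int.mod left n = left from hld,
      show sr * n + PySem.Int.mod right n + 1 = right + 1 from by rw [heq] at hrd; omega]
    simp [solution_alt_cell]
  · -- sr < er : first row, then the tail rows
    rw [PySem.List.pyRange_one_cons (by omega : sr < er + 1)]
    simp only [List.foldl_cons, if_true, if_neg (by omega : ¬ sr = er)]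
    rw [pvInner n sr (PySem.Int.mod left n) (n - 1) [] hn hl0 (by omega)]
    rw [pvTail n right sr er (PySem.Int.mod left n) hn her ((er - (sr + 1)).toNat) (sr + 1)
      _ rfl (by omega) (by omega)]
    have h1 : left ≤ (sr + 1) * n := by nlinarith
    have h2 : (sr + 1) * n ≤ right + 1 := by
      have := mul_le_mul_of_nonneg_right (show sr + 1 ≤ er by omega) (le_of_lt hn)
      linarith
    rw [show sr * n + PySem.Int.mod left n = left from hld,
      show sr * n + (n - 1) + 1 = (sr + 1) * n from by ring, List.nil_append, ← List.map_append,
      ← PySem.List.pyRange_one_append left ((sr + 1) * n) (right + 1) h1 h2]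
    simp [solution_alt_cell]
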